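-- pv_equiv track=rewrite | github.com/jun-pac/PS | 240324/8set/temp3.py | solution
-- ===== SOURCE A (Python) =====
-- def solution(cap, k, score, m):
--     if k >= score[m-1]:
--         return 0
--
--     vac_up=0
--     vac_down=0
--     reserve=[]
--     mv=0
--     ans=0
--     for i in range(m-1):
--         vac_up+=cap-score[i]
--         reserve.append(cap-score[i])
--     for i in range(m-1,len(score)):
--         if(score[i]>k):
--             mv+=score[i]-k
--             ans+=1
--         else:
--             vac_down+=k-score[i]
--             reserve.append(k-score[i])
--     if(mv>vac_up+vac_down):
--         return -1
--     reserve.sort()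
--     reserve.reverse()
--     cur=0
--     for i in range(len(reserve)):
--         cur+=reserve[i]
--         if(cur>=mv):
--             ans=i+1+ans
--             break
--
--     return ans
-- ===== SOURCE B (Python) =====
-- def solution(cap, k, score, m):
--     if k >= score[m - 1]:
--         return 0
--     head = score[:m - 1]
--     tail = score[m - 1:]
--     reserve = [cap - s for s in head] + [k - s for s in tail if s <= k]
--     over = [s for s in tail if s > k]
--     mv = sum(s - k for s in over)
--     ans = len(over)
--     if mv > sum(reserve):
--         return -1
--     cur = 0
--     cnt = 0
--     while reserve:
--         v = max(reserve)
--         reserve.remove(v)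
--         cur += v
--         cnt += 1
--         if cur >= mv:
--             return ans + cnt
--     return ans
-- ===== Notes on version B (the rewrite author's own statement) =====
-- stated objective: alternative
-- what changed: B replaces A's index loops by slice/comprehension aggregation and, instead of sorting the reserve list descending and scanning a prefix, covers the deficit by repeated max-extraction (selection without any sort): pop the maximum remaining reserve until the running sum reaches mv.
-- outside the precondition, e.g. on solution(10, 5, [3, 4, 6], 0): A returns 3, B returns 2
import Mathlib
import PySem

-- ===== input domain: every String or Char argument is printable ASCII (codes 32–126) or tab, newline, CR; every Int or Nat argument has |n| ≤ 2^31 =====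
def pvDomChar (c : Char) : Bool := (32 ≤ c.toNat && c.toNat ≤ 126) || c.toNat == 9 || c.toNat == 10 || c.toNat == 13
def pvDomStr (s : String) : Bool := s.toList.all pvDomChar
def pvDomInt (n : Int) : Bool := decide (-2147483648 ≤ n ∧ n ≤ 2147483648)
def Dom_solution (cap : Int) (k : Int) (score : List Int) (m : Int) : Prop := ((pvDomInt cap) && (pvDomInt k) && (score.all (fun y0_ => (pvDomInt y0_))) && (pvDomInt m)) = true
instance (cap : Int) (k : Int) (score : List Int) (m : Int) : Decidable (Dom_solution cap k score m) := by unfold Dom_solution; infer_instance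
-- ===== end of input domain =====

-- B builds the reserve list by slices/comprehensions instead of A's index loops, and covers
-- the deficit by repeated max-extraction (no sort at all) instead of A's sort+reverse+prefix
-- scan (objective: alternative algorithm, same result).

-- ===== PORT A =====
-- body of `for i in range(m-1): vac_up += cap-score[i]; reserve.append(cap-score[i])`
def aBody1 (cap : Int) (st : Int × List Int) (s : Int) : Int × List Int :=
  (st.1 + (cap - s), st.2 ++ [cap - s])

-- body of `for i in range(m-1, len(score)):` over state (vac_down, reserve, mv, ans)
def aBody2 (k : Int) (st : Int × List Int × Int × Int) (s : Int) : Int × List Int × Int × Int :=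
  if s > k then (st.1, st.2.1, st.2.2.1 + (s - k), st.2.2.2 + 1)
  else (st.1 + (k - s), st.2.1 ++ [k - s], st.2.2.1, st.2.2.2)

-- `for i in range(len(reserve)): cur += reserve[i]; if cur >= mv: ans = i+1+ans; break`
def solAScan (reserve : List Int) (i cur mv ans : Int) : Int :=
  match reserve with
  | [] => ans
  | x :: xs =>
    if cur + x ≥ mv then i + 1 + ans else solAScan xs (i + 1) (cur + x) mv ans

def solution (cap : Int) (k : Int) (score : List Int) (m : Int) : Int :=
  if k ≥ (PySem.List.pyGet? score (m - 1)).getD 0 then 0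
  else
    let st1 := (PySem.List.pyRange 0 (m - 1) 1).foldl
      (fun st i => aBody1 cap st (PySem.List.pyGetD score i 0)) (0, [])
    let st2 := (PySem.List.pyRange (m - 1) (score.length : Int) 1).foldl
      (fun st i => aBody2 k st (PySem.List.pyGetD score i 0)) (0, st1.2, 0, 0)
    let vacUp := st1.1
    let vacDown := st2.1
    let reserve := st2.2.1
    let mv := st2.2.2.1
    let ans := st2.2.2.2
    if mv > vacUp + vacDown then (-1 : Int)
    else
      let r := (PySem.List.sorted reserve (fun x => x) false).reverse
      solAScan r 0 0 mv ans

-- ===== PORT B =====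
-- `while reserve: v = max(reserve); reserve.remove(v); cur += v; cnt += 1; if cur >= mv: return ans + cnt`
-- (remove(v) with v = max(reserve) ∈ reserve is exactly List.erase: first occurrence of v)
def bLoop (reserve : List Int) (cur cnt mv ans : Int) : Int :=
  if hne : reserve = [] then ans
  else
    let v := reserve.max?.getD 0
    if cur + v ≥ mv then ans + (cnt + 1)
    else bLoop (reserve.erase v) (cur + v) (cnt + 1) mv ans
termination_by reserve.length
decreasing_by
  have hv : reserve.max?.getD 0 ∈ reserve := by
    cases hm : reserve.max? with
    | none => exact absurd (List.max?_eq_none_iff.mp hm) hne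
    | some w => simpa [hm] using (List.max?_eq_some_iff.mp hm).1
  rw [List.length_erase_of_mem hv]
  have := List.length_pos_of_mem hv
  omega

def solution_alt (cap : Int) (k : Int) (score : List Int) (m : Int) : Int :=
  if k ≥ (PySem.List.pyGet? score (m - 1)).getD 0 then 0
  else
    let head := PySem.List.slice score none (some (m - 1))
    let tail := PySem.List.slice score (some (m - 1)) none
    let reserve := head.map (fun s => cap - s)
      ++ (tail.filter (fun s => decide (s ≤ k))).map (fun s => k - s)
    let ov := tail.filter (fun s => decide (k < s))
    let mv := (ov.map (fun s => s - k)).sum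
    let ans : Int := (ov.length : Int)
    if mv > reserve.sum then (-1 : Int)
    else bLoop reserve 0 0 mv ans

-- ===== PRECONDITION & SPEC =====
-- Pre_ restricts m to its natural domain as a 1-based position in score (1 ≤ m ≤ len(score));
-- outside it A raises IndexError (m > len(score)) or relies on Python's negative-index
-- wraparound (m ≤ 0), which B does not reproduce.
def Pre_solution (cap : Int) (k : Int) (score : List Int) (m : Int) : Prop :=
  1 ≤ m ∧ m ≤ (score.length : Int)
instance (cap : Int) (k : Int) (score : List Int) (m : Int) : Decidable (Pre_solution cap k score m) := by unfold Pre_solution; infer_instance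

def pvWitness_solution : Int × Int × List Int × Int := (10, 5, [3, 4, 6], 2)

def Spec_solution (cap : Int) (k : Int) (score : List Int) (m : Int) (out : Int) : Prop := out = solution_alt cap k score m
instance (cap : Int) (k : Int) (score : List Int) (m : Int) (out : Int) : Decidable (Spec_solution cap k score m out) := by unfold Spec_solution; infer_instance

-- ===== CLAIM =====
def Claim_equal_solution : Prop := ∀ (cap : Int) (k : Int) (score : List Int) (m : Int), Dom_solution cap k score m → Pre_solution cap k score m → Spec_solution cap k score m (solution cap k score m)

-- ===== LEMMAS AND PROOFS =====

theorem a1_closed (cap : Int) : ∀ (l : List Int) (v : Int) (r : List Int),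
    l.foldl (aBody1 cap) (v, r)
      = (v + (l.map (fun s => cap - s)).sum, r ++ l.map (fun s => cap - s)) := by
  intro l
  induction l with
  | nil => intro v r; simp
  | cons x xs ih =>
    intro v r
    simp only [List.foldl_cons, List.map_cons, List.sum_cons, aBody1, ih, Prod.mk.injEq]
    exact ⟨by ring, by simp⟩

theorem a2_closed (k : Int) : ∀ (l : List Int) (vd : Int) (r : List Int) (mv ans : Int),
    l.foldl (aBody2 k) (vd, r, mv, ans)
      = (vd + ((l.filter (fun s => decide (s ≤ k))).map (fun s => k - s)).sum,
         r ++ (l.filter (fun s => decide (s ≤ k))).map (fun s => k - s),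
         mv + ((l.filter (fun s => decide (k < s))).map (fun s => s - k)).sum,
         ans + (((l.filter (fun s => decide (k < s))).length : Nat) : Int)) := by
  intro l
  induction l with
  | nil => intro vd r mv ans; simp
  | cons x xs ih =>
    intro vd r mv ans
    by_cases h : x > k
    · have h1 : ¬ (x ≤ k) := by omega
      have e : aBody2 k (vd, r, mv, ans) x = (vd, r, mv + (x - k), ans + 1) := by
        simp [aBody2, h]
      have f1 : (x :: xs).filter (fun s => decide (s ≤ k))
          = xs.filter (fun s => decide (s ≤ k)) := by
        rw [List.filter_cons]; simp [h1]
      have f2 : (x :: xs).filter (fun s => decide (k < s))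
          = x :: xs.filter (fun s => decide (k < s)) := by
        rw [List.filter_cons]; simp [h]
      rw [List.foldl_cons, e, ih, f1, f2]
      simp only [List.map_cons, List.sum_cons, List.length_cons, Prod.mk.injEq]
      push_cast
      and_intros <;> first | trivial | ring1
    · have h1 : x ≤ k := by omega
      have e : aBody2 k (vd, r, mv, ans) x = (vd + (k - x), r ++ [k - x], mv, ans) := by
        simp [aBody2, h]
      have f1 : (x :: xs).filter (fun s => decide (s ≤ k))
          = x :: xs.filter (fun s => decide (s ≤ k)) := by
        rw [List.filter_cons]; simp [h1]
      have f2 : (x :: xs).filter (fun s => decide (k < s))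
          = xs.filter (fun s => decide (k < s)) := by
        rw [List.filter_cons]; simp [h]
      rw [List.foldl_cons, e, ih, f1, f2]
      simp only [List.map_cons, List.sum_cons, Prod.mk.injEq]
      and_intros <;> first | trivial | ring1 | simp

theorem foldl_pyRange_take {σ : Type} (xs : List Int) (d : Int) (f : σ → Int → σ) :
    ∀ (n : Nat) (init : σ), n ≤ xs.length →
    (PySem.List.pyRange 0 (n : Int) 1).foldl (fun acc j => f acc (PySem.List.pyGetD xs j d)) init
      = (xs.take n).foldl f init := by
  intro n
  induction n with
  | zero => intro init _; simp [PySem.List.pyRange_one_eq_nil]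
  | succ n ih =>
    intro init hn
    have hlt : n < xs.length := by omega
    have h1 : ((n + 1 : Nat) : Int) = (n : Int) + 1 := by push_cast; ring
    have h2 : List.take (n + 1) xs = List.take n xs ++ [xs[n]] := by
      rw [← List.take_concat_get hlt, List.concat_eq_append]
    rw [h1, PySem.List.pyRange_one_succ_right (by positivity), List.foldl_append,
        ih init (by omega), h2, List.foldl_append]
    simp [PySem.List.pyGetD_natCast, List.getD, List.getElem?_eq_getElem hlt]

-- descending-sorted l is its maximum followed by descending-sorted (l minus that maximum)
theorem sorted_desc_cons (l : List Int) (v : Int) (h : l.max? = some v) :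
    (PySem.List.sorted l (fun x => x) false).reverse
      = v :: (PySem.List.sorted (l.erase v) (fun x => x) false).reverse := by
  obtain ⟨hmem, hub⟩ := List.max?_eq_some_iff.mp h
  have hp1 : ((PySem.List.sorted (l.erase v) (fun x => x) false) ++ [v]).Perm l :=
    (((PySem.List.sorted_perm (l.erase v) (fun x => x) false).append_right [v]).trans
      (List.perm_append_singleton v (l.erase v))).trans (List.perm_cons_erase hmem).symm
  have hpw : List.Pairwise (fun a b => a ≤ b)
      ((PySem.List.sorted (l.erase v) (fun x => x) false) ++ [v]) := by
    rw [List.pairwise_append]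
    refine ⟨PySem.List.sorted_pairwise (l.erase v) (fun x => x),
      List.pairwise_singleton _ _, ?_⟩
    intro a ha b hb
    have hav : a ≤ v :=
      hub a (List.mem_of_mem_erase ((PySem.List.mem_sorted (l.erase v) (fun x => x) false a).mp ha))
    rw [List.mem_singleton] at hb
    omega
  rw [PySem.List.sorted_id_eq_of_perm_of_pairwise l _ hp1 hpw, List.reverse_append]
  simp

theorem bLoop_eq : ∀ (n : Nat) (l : List Int), l.length ≤ n → ∀ (cur cnt mv ans : Int),
    bLoop l cur cnt mv ans
      = solAScan ((PySem.List.sorted l (fun x => x) false).reverse) cnt cur mv ans := by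
  intro n
  induction n with
  | zero =>
    intro l hl cur cnt mv ans
    have hnil : l = [] := List.eq_nil_of_length_eq_zero (by omega)
    subst hnil
    rw [bLoop, (PySem.List.sorted_eq_nil_iff ([] : List Int) (fun x => x) false).mpr rfl]
    simp [solAScan]
  | succ n ih =>
    intro l hl cur cnt mv ans
    by_cases hne : l = []
    · subst hne
      rw [bLoop, (PySem.List.sorted_eq_nil_iff ([] : List Int) (fun x => x) false).mpr rfl]
      simp [solAScan]
    · cases hm : l.max? with
      | none => exact absurd (List.max?_eq_none_iff.mp hm) hne
      | some v =>
        have hmem : v ∈ l := (List.max?_eq_some_iff.mp hm).1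
        rw [bLoop, dif_neg hne, sorted_desc_cons l v hm]
        simp only [hm, Option.getD_some, solAScan]
        by_cases hc : cur + v ≥ mv
        · rw [if_pos hc, if_pos hc]; ring
        · rw [if_neg hc, if_neg hc]
          exact ih (l.erase v) (by rw [List.length_erase_of_mem hmem]; omega) _ _ _ _

-- ===== VERDICT (by name: the statement is the Claim_ definition above) =====
theorem solution_spec : Claim_equal_solution := by
  intro cap k score m _ hpre
  obtain ⟨hm1, hm2⟩ := hpre
  unfold Spec_solution solution solution_alt
  by_cases hg : k ≥ (PySem.List.pyGet? score (m - 1)).getD 0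
  · simp only [if_pos hg]
  · simp only [if_neg hg]
    set p : Nat := (m - 1).toNat with hp
    have hpc : ((p : Nat) : Int) = m - 1 := Int.toNat_of_nonneg (by omega)
    have hple : p ≤ score.length := by omega
    have hhead : PySem.List.slice score none (some (m - 1)) = score.take p := by
      rw [PySem.List.slice_to score (show (0:Int) ≤ m - 1 by omega)]
    have htail : PySem.List.slice score (some (m - 1)) none = score.drop p := by
      rw [PySem.List.slice_from score (show (0:Int) ≤ m - 1 by omega)]
    have hA1 : (PySem.List.pyRange 0 (m - 1) 1).foldl
        (fun st i => aBody1 cap st (PySem.List.pyGetD score i 0)) ((0 : Int), ([] : List Int))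
        = (((score.take p).map (fun s => cap - s)).sum, (score.take p).map (fun s => cap - s)) := by
      rw [← hpc, foldl_pyRange_take score 0 (aBody1 cap) p _ hple, a1_closed]
      simp
    have hA2 : ∀ init : Int × List Int × Int × Int,
        (PySem.List.pyRange (m - 1) (score.length : Int) 1).foldl
          (fun st i => aBody2 k st (PySem.List.pyGetD score i 0)) init
        = (score.drop p).foldl (aBody2 k) init := by
      intro init
      have := PySem.List.foldl_pyRange_pyGetD' score 0 (aBody2 k) init (a := m - 1) (by omega)
      rw [← hp] at this
      exact this
    rw [hA1, hA2, a2_closed, hhead, htail]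
    dsimp only
    set R1 := (score.take p).map (fun s => cap - s) with hR1
    set R2 := ((score.drop p).filter (fun s => decide (s ≤ k))).map (fun s => k - s) with hR2
    set O := (score.drop p).filter (fun s => decide (k < s)) with hO
    set mv := (O.map (fun s => s - k)).sum with hmv
    have hguard : (0 + mv > R1.sum + (0 + R2.sum)) ↔ (mv > (R1 ++ R2).sum) := by
      rw [List.sum_append]; omega
    by_cases hga : mv > (R1 ++ R2).sum
    · rw [if_pos (hguard.mpr hga), if_pos hga]
    · rw [if_neg (fun hc => hga (hguard.mp hc)), if_neg hga]
      rw [bLoop_eq (R1 ++ R2).length (R1 ++ R2) le_rfl]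
      simp
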